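-- pv_equiv track=rewrite | github.com/siisi1324/RealSSAFY | lecture/algorithm/algorithm/0207_al3/coloring(my).py | solution
-- ===== SOURCE A (Python) =====
-- def solution(informations):
--     ans=0
--     # 0으로 채운 10 x 10 격자
--     # 입력되는 색상 및 위치 정보를 읽어 2중 for 문에서 색상 코드를 더함
--     # 이 때 2중 for 문(row-col)은 10x10 전체를 조사하는 것이 아닌, 입력되는 row, col임.
--     # red=1, blue=2이므로 violet=3
--     # [좌상단_row, 좌상단_col, 우하단_row, 우하단_col, 색상 코드]
--
--     canvas=[[0]*10 for i in range(10)]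
--
--     for info in informations:
--         r1=info[0] # 좌상단_row
--         r2=info[2] # 우하단_row
--         c1=info[1] # 좌상단_col
--         c2=info[3] # 우하단_col
--         color=info[4] # 색상 코드
--
--         for row in range(r1, r2+1): # r1~r2
--             for col in range(c1, c2+1): # c1~c2
--                 canvas[row][col]+=color # 해당 부분에 색상 코드 더하기
--                 if canvas[row][col]==3: # 보라색이면...
--                     ans+=1 # 보라색인 칸 수 업데이트
--
--                 # if canvas[row][col] == 0:  # 빈 공간이라면 현재 색상 추가
--                 #     canvas[row][col] = color
--                 # elif canvas[row][col] == 1 and color == 2:  # 빨강(1) + 파랑(2) = 보라색(3)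
--                 #     canvas[row][col] = 3
--                 #     ans += 1  # 보라색 개수 증가
--                 # elif canvas[row][col] == 2 and color == 1:  # 파랑(2) + 빨강(1) = 보라색(3)
--                 #     canvas[row][col] = 3
--                 #     ans += 1  # 보라색 개수 증가
--
--                 # 같은 색상의 상자가 2개 이상일 경우를 위해서..
--
--     return ans
-- ===== SOURCE B (Python) =====
-- def solution(informations):
--     # Gather-then-replay: record each cell's color history on a 10x10 grid of
--     # lists, then sweep all cells counting the moments a running sum hits 3.
--     cells = [[[] for _ in range(10)] for _ in range(10)]
--     for info in informations:
--         r1 = info[0]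
--         c1 = info[1]
--         r2 = info[2]
--         c2 = info[3]
--         color = info[4]
--         for row in range(r1, r2 + 1):
--             for col in range(c1, c2 + 1):
--                 cells[row][col].append(color)
--     ans = 0
--     for grid_row in cells:
--         for cell in grid_row:
--             total = 0
--             for color in cell:
--                 total += color
--                 if total == 3:
--                     ans += 1
--     return ans
-- ===== Notes on version B (the rewrite author's own statement) =====
-- stated objective: alternative
-- what changed: A paints color sums onto a 10x10 int grid and counts cells the moment their sum hits 3 inside the painting loop; B first gathers each cell's full color history into a 10x10 grid of lists, then a separate replay sweep over all 100 cells counts every moment a running sum equals 3.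
import Mathlib
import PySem

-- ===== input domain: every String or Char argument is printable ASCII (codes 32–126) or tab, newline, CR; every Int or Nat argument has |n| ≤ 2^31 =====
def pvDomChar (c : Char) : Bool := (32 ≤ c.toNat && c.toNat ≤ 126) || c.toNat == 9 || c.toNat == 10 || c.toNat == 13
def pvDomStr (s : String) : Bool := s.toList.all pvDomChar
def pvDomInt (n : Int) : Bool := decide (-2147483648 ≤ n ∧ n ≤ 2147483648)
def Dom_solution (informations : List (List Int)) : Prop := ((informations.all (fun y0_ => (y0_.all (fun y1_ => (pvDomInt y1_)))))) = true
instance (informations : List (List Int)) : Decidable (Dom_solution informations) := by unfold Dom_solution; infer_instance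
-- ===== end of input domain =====

-- B replaces A's paint-and-check-as-you-go with a gather-then-replay decomposition
-- (record each cell's color history, then a separate sweep counts running-sum hits of 3);
-- same cost, objective: alternative. Equivalence of RETURN values (A mutates only locals).

-- ===== PORT A =====
def solution (informations : List (List Int)) : Int :=
  let canvas : List (List Int) := (List.range 10).map (fun _ => List.replicate 10 (0 : Int))
  (informations.foldl (fun (st : List (List Int) × Int) info =>
    let r1 := PySem.List.pyGetD info 0 0
    let r2 := PySem.List.pyGetD info 2 0
    let c1 := PySem.List.pyGetD info 1 0
    let c2 := PySem.List.pyGetD info 3 0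
    let color := PySem.List.pyGetD info 4 0
    (PySem.List.pyRange r1 (r2 + 1) 1).foldl (fun st row =>
      (PySem.List.pyRange c1 (c2 + 1) 1).foldl (fun (st : List (List Int) × Int) col =>
        let rowL := PySem.List.pyGetD st.1 row []
        let v := PySem.List.pyGetD rowL col 0 + color
        (PySem.List.pySetD st.1 row (PySem.List.pySetD rowL col v),
         if v = 3 then st.2 + 1 else st.2)) st) st)
    (canvas, 0)).2

-- ===== PORT B =====
def solution_alt (informations : List (List Int)) : Int :=
  let cells0 : List (List (List Int)) :=
    (List.range 10).map (fun _ => (List.range 10).map (fun _ => ([] : List Int)))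
  let cells := informations.foldl (fun (cells : List (List (List Int))) info =>
    let r1 := PySem.List.pyGetD info 0 0
    let c1 := PySem.List.pyGetD info 1 0
    let r2 := PySem.List.pyGetD info 2 0
    let c2 := PySem.List.pyGetD info 3 0
    let color := PySem.List.pyGetD info 4 0
    (PySem.List.pyRange r1 (r2 + 1) 1).foldl (fun cells row =>
      (PySem.List.pyRange c1 (c2 + 1) 1).foldl (fun (cells : List (List (List Int))) col =>
        let rowL := PySem.List.pyGetD cells row []
        PySem.List.pySetD cells row
          (PySem.List.pySetD rowL col (PySem.List.pyGetD rowL col [] ++ [color]))) cells) cells)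
    cells0
  cells.foldl (fun ans gridRow => gridRow.foldl (fun ans cell =>
    (cell.foldl (fun (p : Int × Int) color =>
      (p.1 + color, if p.1 + color = 3 then p.2 + 1 else p.2)) ((0 : Int), ans)).2) ans) 0

-- ===== PRECONDITION & SPEC =====
-- Pre_ = exactly the inputs where A returns normally: every rectangle record has ≥ 5 fields,
-- and whenever its row and column ranges are both nonempty all touched indices are valid
-- Python indices of a length-10 list (between -10 and 9); otherwise A raises IndexError.
def Pre_solution (informations : List (List Int)) : Prop :=
  ∀ info ∈ informations, 5 ≤ info.length ∧
    (PySem.List.pyGetD info 0 0 ≤ PySem.List.pyGetD info 2 0 →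
     PySem.List.pyGetD info 1 0 ≤ PySem.List.pyGetD info 3 0 →
     -10 ≤ PySem.List.pyGetD info 0 0 ∧ PySem.List.pyGetD info 2 0 ≤ 9 ∧
     -10 ≤ PySem.List.pyGetD info 1 0 ∧ PySem.List.pyGetD info 3 0 ≤ 9)
instance (informations : List (List Int)) : Decidable (Pre_solution informations) := by
  unfold Pre_solution; infer_instance

def pvWitness_solution : List (List Int) := [[0, 0, 1, 1, 1], [0, 0, 0, 0, 2], [-1, -2, 9, 9, 1]]

def Spec_solution (informations : List (List Int)) (out : Int) : Prop := out = solution_alt informations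
instance (informations : List (List Int)) (out : Int) : Decidable (Spec_solution informations out) := by
  unfold Spec_solution; infer_instance

-- ===== CLAIM (what is proved, stated in full; the proofs are below) =====
def Claim_equal_solution : Prop := ∀ (informations : List (List Int)), Dom_solution informations → Pre_solution informations → Spec_solution informations (solution informations)

-- ===== LEMMAS AND PROOFS =====

-- Python index normalisation for a length-10 list (valid for -10 ≤ r ≤ 9).
def nrm (r : Int) : Nat := if 0 ≤ r then r.toNat else 10 - (-r).toNat

-- a 10×10 grid sampled from a function
def gridF {α : Type} (g : Nat → Nat → α) : List (List α) :=
  (List.range 10).map (fun i => (List.range 10).map (g i))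

def updF {α : Type} (g : Nat → Nat → α) (i j : Nat) (v : α) : Nat → Nat → α :=
  fun i' j' => if i' = i ∧ j' = j then v else g i' j'

-- the flattened sequence of cell accesses (row, col, color) both programs perform
def accs (informations : List (List Int)) : List (Int × Int × Int) :=
  informations.flatMap (fun info =>
    (PySem.List.pyRange (PySem.List.pyGetD info 0 0) (PySem.List.pyGetD info 2 0 + 1) 1).flatMap (fun row =>
      (PySem.List.pyRange (PySem.List.pyGetD info 1 0) (PySem.List.pyGetD info 3 0 + 1) 1).map (fun col =>
        (row, col, PySem.List.pyGetD info 4 0))))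

def Bnd (L : List (Int × Int × Int)) : Prop :=
  ∀ x ∈ L, -10 ≤ x.1 ∧ x.1 ≤ 9 ∧ -10 ≤ x.2.1 ∧ x.2.1 ≤ 9

-- one A-step / one B-phase-1-step on the concrete state
def stA (st : List (List Int) × Int) (x : Int × Int × Int) : List (List Int) × Int :=
  let rowL := PySem.List.pyGetD st.1 x.1 []
  let v := PySem.List.pyGetD rowL x.2.1 0 + x.2.2
  (PySem.List.pySetD st.1 x.1 (PySem.List.pySetD rowL x.2.1 v),
   if v = 3 then st.2 + 1 else st.2)

def stB (cells : List (List (List Int))) (x : Int × Int × Int) : List (List (List Int)) :=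
  let rowL := PySem.List.pyGetD cells x.1 []
  PySem.List.pySetD cells x.1
    (PySem.List.pySetD rowL x.2.1 (PySem.List.pyGetD rowL x.2.1 [] ++ [x.2.2]))

-- abstract A-fold over the access list
def foldA : List (Int × Int × Int) → (Nat → Nat → Int) → Int → ((Nat → Nat → Int) × Int)
  | [], g, a => (g, a)
  | x :: L, g, a =>
      foldA L (updF g (nrm x.1) (nrm x.2.1) (g (nrm x.1) (nrm x.2.1) + x.2.2))
        (if g (nrm x.1) (nrm x.2.1) + x.2.2 = 3 then a + 1 else a)

-- the colors hitting cell (i, j), in order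
def filt (L : List (Int × Int × Int)) (i j : Nat) : List Int :=
  L.filterMap (fun x => if nrm x.1 = i ∧ nrm x.2.1 = j then some x.2.2 else none)

-- number of moments a running sum started at s hits 3
def hitsFrom (s : Int) : List Int → Int
  | [] => 0
  | c :: l => (if s + c = 3 then (1 : Int) else 0) + hitsFrom (s + c) l

def SS (F : Nat → Nat → Int) : Int := ∑ i ∈ Finset.range 10, ∑ j ∈ Finset.range 10, F i j

theorem nrm_lt {r : Int} (h1 : -10 ≤ r) (h2 : r ≤ 9) : nrm r < 10 := by
  unfold nrm; split_ifs <;> omega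

theorem pyIdx10 {r : Int} (h1 : -10 ≤ r) (h2 : r ≤ 9) :
    PySem.List.pyIdx? 10 r = some (nrm r) := by
  unfold PySem.List.pyIdx? nrm
  split_ifs <;> first | rfl | (exfalso; omega)

theorem pyGetD10 {α : Type} {l : List α} (hl : l.length = 10) {r : Int}
    (h1 : -10 ≤ r) (h2 : r ≤ 9) (d : α) :
    PySem.List.pyGetD l r d = l.getD (nrm r) d := by
  unfold PySem.List.pyGetD PySem.List.pyGet?
  rw [hl, pyIdx10 h1 h2]
  simp [List.getD_eq_getElem?_getD]

theorem pySetD10 {α : Type} {l : List α} (hl : l.length = 10) {r : Int}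
    (h1 : -10 ≤ r) (h2 : r ≤ 9) (v : α) :
    PySem.List.pySetD l r v = l.set (nrm r) v := by
  unfold PySem.List.pySetD PySem.List.pySet?
  rw [hl, pyIdx10 h1 h2]
  rfl

theorem getD_map_range10 {α : Type} (f : Nat → α) {n : Nat} (hn : n < 10) (d : α) :
    ((List.range 10).map f).getD n d = f n := by
  rw [List.getD_eq_getElem?_getD, List.getElem?_map, List.getElem?_range hn]
  rfl

theorem set_map_range10 {α : Type} (f : Nat → α) {n : Nat} (_hn : n < 10) (v : α) :
    ((List.range 10).map f).set n v = (List.range 10).map (fun k => if k = n then v else f k) := by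
  apply List.ext_getElem (by simp)
  intro i hi1 hi2
  by_cases h : n = i
  · subst h; simp [List.getElem_map, List.getElem_range]
  · rw [List.getElem_set_ne h]
    simp only [List.getElem_map, List.getElem_range]
    rw [if_neg (by omega)]

theorem gridF_congr {α : Type} {g g' : Nat → Nat → α}
    (h : ∀ i < 10, ∀ j < 10, g i j = g' i j) : gridF g = gridF g' := by
  unfold gridF
  apply List.map_congr_left
  intro i hi
  apply List.map_congr_left
  intro j hj
  exact h i (List.mem_range.mp hi) j (List.mem_range.mp hj)


theorem length_gridF {α : Type} (g : Nat → Nat → α) : (gridF g).length = 10 := by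
  simp [gridF]

theorem gridF_get {α : Type} (g : Nat → Nat → α) {r : Int} (h1 : -10 ≤ r) (h2 : r ≤ 9) (d : List α) :
    PySem.List.pyGetD (gridF g) r d = (List.range 10).map (g (nrm r)) := by
  rw [pyGetD10 (length_gridF g) h1 h2]
  exact getD_map_range10 _ (nrm_lt h1 h2) _

theorem row_get {α : Type} (g : Nat → Nat → α) (i : Nat) {c : Int} (h3 : -10 ≤ c) (h4 : c ≤ 9) (d : α) :
    PySem.List.pyGetD ((List.range 10).map (g i)) c d = g i (nrm c) := by
  rw [pyGetD10 (by simp) h3 h4]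
  exact getD_map_range10 _ (nrm_lt h3 h4) _

theorem grid_set {α : Type} (g : Nat → Nat → α) {r c : Int}
    (h1 : -10 ≤ r) (h2 : r ≤ 9) (h3 : -10 ≤ c) (h4 : c ≤ 9) (v : α) :
    PySem.List.pySetD (gridF g) r
      (PySem.List.pySetD ((List.range 10).map (g (nrm r))) c v)
    = gridF (updF g (nrm r) (nrm c) v) := by
  rw [pySetD10 (by simp) h3 h4, set_map_range10 _ (nrm_lt h3 h4),
      pySetD10 (length_gridF g) h1 h2]
  show ((List.range 10).map (fun i => (List.range 10).map (g i))).set (nrm r) _ = _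
  rw [set_map_range10 _ (nrm_lt h1 h2)]
  unfold gridF updF
  apply List.map_congr_left
  intro i _
  by_cases hi : i = nrm r
  · subst hi
    rw [if_pos rfl]
    apply List.map_congr_left
    intro j _
    by_cases hj : j = nrm c
    · subst hj; simp
    · rw [if_neg hj, if_neg (by tauto)]
  · rw [if_neg hi]
    apply List.map_congr_left
    intro j _
    rw [if_neg (by tauto)]

-- one concrete A-step on a grid-shaped state is the abstract step
theorem stA_grid (g : Nat → Nat → Int) (a : Int) (x : Int × Int × Int)
    (h1 : -10 ≤ x.1) (h2 : x.1 ≤ 9) (h3 : -10 ≤ x.2.1) (h4 : x.2.1 ≤ 9) :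
    stA (gridF g, a) x =
      (gridF (updF g (nrm x.1) (nrm x.2.1) (g (nrm x.1) (nrm x.2.1) + x.2.2)),
       if g (nrm x.1) (nrm x.2.1) + x.2.2 = 3 then a + 1 else a) := by
  obtain ⟨r, c, col⟩ := x
  simp only [stA]
  rw [gridF_get g h1 h2, row_get g _ h3 h4, grid_set g h1 h2 h3 h4]

theorem simA (L : List (Int × Int × Int)) : Bnd L → ∀ (g : Nat → Nat → Int) (a : Int),
    L.foldl stA (gridF g, a) = (gridF (foldA L g a).1, (foldA L g a).2) := by
  induction L with
  | nil => intro _ g a; simp [foldA]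
  | cons x L ih =>
    intro hB g a
    obtain ⟨b1, b2, b3, b4⟩ := hB x (List.mem_cons_self ..)
    simp only [List.foldl_cons, foldA]
    rw [stA_grid g a x b1 b2 b3 b4]
    exact ih (fun y hy => hB y (List.mem_cons_of_mem _ hy)) _ _

theorem filt_cons (x : Int × Int × Int) (L : List (Int × Int × Int)) (i j : Nat) :
    filt (x :: L) i j =
      if nrm x.1 = i ∧ nrm x.2.1 = j then x.2.2 :: filt L i j else filt L i j := by
  simp only [filt, List.filterMap_cons]
  split_ifs <;> rfl

theorem SS_update (F F' : Nat → Nat → Int) (i0 j0 : Nat) (hi : i0 < 10) (hj : j0 < 10)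
    (hF : ∀ i j, ¬(i = i0 ∧ j = j0) → F' i j = F i j) :
    SS F' = (F' i0 j0 - F i0 j0) + SS F := by
  have hi0 : i0 ∈ Finset.range 10 := Finset.mem_range.mpr hi
  have hj0 : j0 ∈ Finset.range 10 := Finset.mem_range.mpr hj
  unfold SS
  rw [← Finset.add_sum_erase _ _ hi0, ← Finset.add_sum_erase _ (fun i => ∑ j ∈ Finset.range 10, F i j) hi0,
      ← Finset.add_sum_erase _ _ hj0, ← Finset.add_sum_erase _ (F i0) hj0]
  have h1 : ∑ j ∈ (Finset.range 10).erase j0, F' i0 j = ∑ j ∈ (Finset.range 10).erase j0, F i0 j := by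
    apply Finset.sum_congr rfl
    intro j hjmem
    exact hF i0 j (by simp at hjmem; tauto)
  have h2 : ∑ i ∈ (Finset.range 10).erase i0, ∑ j ∈ Finset.range 10, F' i j
      = ∑ i ∈ (Finset.range 10).erase i0, ∑ j ∈ Finset.range 10, F i j := by
    apply Finset.sum_congr rfl
    intro i himem
    apply Finset.sum_congr rfl
    intro j _
    exact hF i j (by simp at himem; tauto)
  rw [h1, h2]
  ring

theorem countA (L : List (Int × Int × Int)) : Bnd L → ∀ (g : Nat → Nat → Int) (a : Int),
    (foldA L g a).2 = a + SS (fun i j => hitsFrom (g i j) (filt L i j)) := by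
  induction L with
  | nil => intro _ g a; simp [foldA, filt, SS, hitsFrom]
  | cons x L ih =>
    intro hB g a
    obtain ⟨b1, b2, b3, b4⟩ := hB x (List.mem_cons_self ..)
    simp only [foldA]
    rw [ih (fun y hy => hB y (List.mem_cons_of_mem _ hy))]
    rw [SS_update (fun i j => hitsFrom (updF g (nrm x.1) (nrm x.2.1) (g (nrm x.1) (nrm x.2.1) + x.2.2) i j) (filt L i j))
        (fun i j => hitsFrom (g i j) (filt (x :: L) i j)) (nrm x.1) (nrm x.2.1)
        (nrm_lt b1 b2) (nrm_lt b3 b4) ?_]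
    · have hpt : filt (x :: L) (nrm x.1) (nrm x.2.1) = x.2.2 :: filt L (nrm x.1) (nrm x.2.1) := by
        rw [filt_cons]; rw [if_pos ⟨rfl, rfl⟩]
      have hupd : updF g (nrm x.1) (nrm x.2.1) (g (nrm x.1) (nrm x.2.1) + x.2.2) (nrm x.1) (nrm x.2.1)
          = g (nrm x.1) (nrm x.2.1) + x.2.2 := by
        unfold updF; rw [if_pos ⟨rfl, rfl⟩]
      rw [hpt, hupd]
      simp only [hitsFrom]
      split_ifs <;> ring
    · intro i j hij
      beta_reduce
      rw [filt_cons, if_neg (by tauto)]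
      unfold updF
      rw [if_neg (by tauto)]

-- one concrete B-phase-1 step on a grid-shaped state appends the color
theorem stB_grid (h : Nat → Nat → List Int) (x : Int × Int × Int)
    (h1 : -10 ≤ x.1) (h2 : x.1 ≤ 9) (h3 : -10 ≤ x.2.1) (h4 : x.2.1 ≤ 9) :
    stB (gridF h) x = gridF (updF h (nrm x.1) (nrm x.2.1) (h (nrm x.1) (nrm x.2.1) ++ [x.2.2])) := by
  obtain ⟨r, c, col⟩ := x
  simp only [stB]
  rw [gridF_get h h1 h2, row_get h _ h3 h4, grid_set h h1 h2 h3 h4]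

theorem simB (L : List (Int × Int × Int)) : Bnd L → ∀ (h : Nat → Nat → List Int),
    L.foldl stB (gridF h) = gridF (fun i j => h i j ++ filt L i j) := by
  induction L with
  | nil => intro _ h; simp [filt, gridF]
  | cons x L ih =>
    intro hB h
    obtain ⟨b1, b2, b3, b4⟩ := hB x (List.mem_cons_self ..)
    simp only [List.foldl_cons]
    rw [stB_grid h x b1 b2 b3 b4, ih (fun y hy => hB y (List.mem_cons_of_mem _ hy))]
    apply gridF_congr
    intro i _ j _
    rw [filt_cons]
    unfold updF
    by_cases hc : nrm x.1 = i ∧ nrm x.2.1 = j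
    · rw [if_pos hc, if_pos (by tauto)]
      obtain ⟨hc1, hc2⟩ := hc
      subst hc1; subst hc2
      simp
    · rw [if_neg hc, if_neg (by tauto)]

theorem cellFold (cell : List Int) : ∀ (t a : Int),
    (cell.foldl (fun (p : Int × Int) color =>
      (p.1 + color, if p.1 + color = 3 then p.2 + 1 else p.2)) (t, a)).2 = a + hitsFrom t cell := by
  induction cell with
  | nil => intro t a; simp [hitsFrom]
  | cons c l ih =>
    intro t a
    simp only [List.foldl_cons, hitsFrom]
    rw [ih]
    split_ifs <;> ring

theorem foldl_addf {α : Type} (f : α → Int) (l : List α) : ∀ (a : Int),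
    l.foldl (fun a x => a + f x) a = a + (l.map f).sum := by
  induction l with
  | nil => intro a; simp
  | cons x l ih =>
    intro a
    simp only [List.foldl_cons, List.map_cons, List.sum_cons]
    rw [ih]
    ring

theorem sum_map_range (f : Nat → Int) (n : Nat) :
    ((List.range n).map f).sum = ∑ i ∈ Finset.range n, f i := by
  induction n with
  | zero => simp
  | succ n ih =>
    rw [List.range_succ, List.map_append, List.sum_append, Finset.sum_range_succ, ih]
    simp

theorem phase2_grid (q : Nat → Nat → List Int) :
    (gridF q).foldl (fun ans gridRow => gridRow.foldl (fun ans cell =>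
      (cell.foldl (fun (p : Int × Int) color =>
        (p.1 + color, if p.1 + color = 3 then p.2 + 1 else p.2)) ((0 : Int), ans)).2) ans) 0
    = SS (fun i j => hitsFrom 0 (q i j)) := by
  unfold gridF
  rw [List.foldl_map]
  have inner : ∀ (i : Nat) (ans : Int),
      ((List.range 10).map (q i)).foldl (fun ans cell =>
        (cell.foldl (fun (p : Int × Int) color =>
          (p.1 + color, if p.1 + color = 3 then p.2 + 1 else p.2)) ((0 : Int), ans)).2) ans
      = ans + ∑ j ∈ Finset.range 10, hitsFrom 0 (q i j) := by
    intro i ans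
    rw [List.foldl_map]
    have hfn : (fun (ans : Int) (j : Nat) =>
        (((q i j).foldl (fun (p : Int × Int) color =>
          (p.1 + color, if p.1 + color = 3 then p.2 + 1 else p.2)) ((0 : Int), ans)).2))
        = fun (ans : Int) (j : Nat) => ans + hitsFrom 0 (q i j) := by
      funext ans j
      exact cellFold (q i j) 0 ans
    rw [hfn, foldl_addf (fun j => hitsFrom 0 (q i j)), sum_map_range]
  have hfn2 : (fun (ans : Int) (i : Nat) =>
      ((List.range 10).map (q i)).foldl (fun ans cell =>
        (cell.foldl (fun (p : Int × Int) color =>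
          (p.1 + color, if p.1 + color = 3 then p.2 + 1 else p.2)) ((0 : Int), ans)).2) ans)
      = fun (ans : Int) (i : Nat) => ans + ∑ j ∈ Finset.range 10, hitsFrom 0 (q i j) := by
    funext ans i
    exact inner i ans
  rw [hfn2, foldl_addf (fun i => ∑ j ∈ Finset.range 10, hitsFrom 0 (q i j)), sum_map_range]
  unfold SS
  ring

theorem solution_eq_fold (informations : List (List Int)) :
    solution informations = ((accs informations).foldl stA (gridF (fun _ _ => (0 : Int)), 0)).2 := by
  have hinit : gridF (fun _ _ => (0 : Int)) = (List.range 10).map (fun _ => List.replicate 10 (0 : Int)) := by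
    unfold gridF
    apply List.map_congr_left
    intro i _
    simp [List.map_const']
  rw [hinit]
  unfold solution accs
  rw [List.foldl_flatMap]
  simp only [List.foldl_flatMap, List.foldl_map]
  rfl

theorem solution_alt_eq_fold (informations : List (List Int)) :
    solution_alt informations =
      ((accs informations).foldl stB (gridF (fun _ _ => ([] : List Int)))).foldl
        (fun ans gridRow => gridRow.foldl (fun ans cell =>
          (cell.foldl (fun (p : Int × Int) color =>
            (p.1 + color, if p.1 + color = 3 then p.2 + 1 else p.2)) ((0 : Int), ans)).2) ans) 0 := by
  unfold solution_alt accs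
  simp only [List.foldl_flatMap, List.foldl_map]
  rfl

theorem bnd_accs (informations : List (List Int)) (hPre : Pre_solution informations) :
    Bnd (accs informations) := by
  intro x hx
  simp only [accs, List.mem_flatMap, List.mem_map, PySem.List.mem_pyRange_one] at hx
  obtain ⟨info, hinfo, row, hrow, col, hcol, rfl⟩ := hx
  have hp := (hPre info hinfo).2 (by omega) (by omega)
  simp only
  omega

-- ===== VERDICT (by name: the statement is the Claim_ definition above) =====
theorem solution_spec : Claim_equal_solution := by
  intro informations _hDom hPre
  unfold Spec_solution
  have hB := bnd_accs informations hPre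
  rw [solution_eq_fold, solution_alt_eq_fold,
      simA _ hB, countA _ hB, simB _ hB, phase2_grid]
  simp
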